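-- pv_equiv track=rewrite | github.com/andylehti/SHEP32 | python/shep32cli.py | fromAnyBase
-- ===== SOURCE A (Python) =====
-- def splitWs(s): return s.split()
--
-- def fromAnyBase(n, b):
--     parts = splitWs(n) if isinstance(n, str) else n
--     if not parts: return 0
--     ints = [int(p) for p in parts]
--     def evalRange(start, end):
--         if end - start <= 200:
--             res = 0
--             for i in range(start, end): res = res * b + ints[i]
--             return res
--         mid = (start + end) // 2
--         return evalRange(start, mid) * (b ** (end - mid)) + evalRange(mid, end)
--     return evalRange(0, len(ints))
-- ===== SOURCE B (Python) =====
-- def fromAnyBase(n, b):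
--     parts = n.split() if isinstance(n, str) else list(n)
--     res = 0
--     for p in parts:
--         res = res * b + int(p)
--     return res
-- ===== Notes on version B (the rewrite author's own statement) =====
-- stated objective: simpler
-- what changed: Replaced the recursive balanced-split evalRange (combine with b**k) by one flat Horner loop (res = res*b + int(p)) over the parts; the empty-input branch disappears since the loop yields 0.
import Mathlib
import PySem

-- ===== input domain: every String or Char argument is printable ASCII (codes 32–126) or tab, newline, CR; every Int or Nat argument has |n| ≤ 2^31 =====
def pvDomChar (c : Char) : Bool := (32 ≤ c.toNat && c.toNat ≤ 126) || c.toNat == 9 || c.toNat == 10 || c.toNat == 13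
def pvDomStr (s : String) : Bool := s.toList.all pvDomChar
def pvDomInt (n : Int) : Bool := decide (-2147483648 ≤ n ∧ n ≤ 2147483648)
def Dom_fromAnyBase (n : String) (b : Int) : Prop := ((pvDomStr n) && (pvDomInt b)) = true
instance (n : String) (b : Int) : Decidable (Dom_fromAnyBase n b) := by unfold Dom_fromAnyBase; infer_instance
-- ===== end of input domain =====

-- B replaces A's recursive balanced-split evaluation by one flat Horner loop (simpler).

-- ===== PORT A =====
-- ints[i]: within evalRange every index is in range, so List.getD is exact here.
def evalRange (ints : List Int) (b : Int) (start fin : Nat) : Int :=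
  if fin - start ≤ 200 then
    (List.range' start (fin - start)).foldl (fun r i => r * b + ints.getD i 0) 0
  else
    evalRange ints b start ((start + fin) / 2) * b ^ (fin - (start + fin) / 2) +
      evalRange ints b ((start + fin) / 2) fin
termination_by fin - start
decreasing_by all_goals omega

-- int(p): under Pre_ every part parses, so the getD 0 default is never taken.
def fromAnyBase (n : String) (b : Int) : Int :=
  let parts := PySem.Str.split₀ n
  if parts = [] then 0
  else
    let ints := parts.map (fun p => (PySem.Int.ofStr? p).getD 0)
    evalRange ints b 0 ints.length

-- ===== PORT B =====
def fromAnyBase_alt (n : String) (b : Int) : Int :=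
  (PySem.Str.split₀ n).foldl (fun r p => r * b + (PySem.Int.ofStr? p).getD 0) 0

-- ===== PRECONDITION & SPEC =====
-- Pre_ excludes exactly the inputs where int(p) raises ValueError on some whitespace-separated part.
def Pre_fromAnyBase (n : String) (b : Int) : Prop :=
  ((PySem.Str.split₀ n).all (fun p => (PySem.Int.ofStr? p).isSome)) = true
instance (n : String) (b : Int) : Decidable (Pre_fromAnyBase n b) := by unfold Pre_fromAnyBase; infer_instance
def pvWitness_fromAnyBase : String × Int := ("12 3", 10)

def Spec_fromAnyBase (n : String) (b : Int) (out : Int) : Prop := out = fromAnyBase_alt n b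
instance (n : String) (b : Int) (out : Int) : Decidable (Spec_fromAnyBase n b out) := by unfold Spec_fromAnyBase; infer_instance

-- ===== CLAIM (what is proved, stated in full; the proofs are below) =====
def Claim_equal_fromAnyBase : Prop := ∀ (n : String) (b : Int), Dom_fromAnyBase n b → Pre_fromAnyBase n b → Spec_fromAnyBase n b (fromAnyBase n b)

-- ===== LEMMAS AND PROOFS =====

def horner (b : Int) (l : List Int) : Int := l.foldl (fun r d => r * b + d) 0

theorem horner_shift (b : Int) (l : List Int) (a : Int) :
    l.foldl (fun r d => r * b + d) a = a * b ^ l.length + horner b l := by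
  induction l generalizing a with
  | nil => simp [horner]
  | cons d t ih =>
    simp only [List.foldl_cons, List.length_cons, horner] at *
    rw [ih (a * b + d), ih (0 * b + d)]
    ring

theorem horner_append (b : Int) (l1 l2 : List Int) :
    horner b (l1 ++ l2) = horner b l1 * b ^ l2.length + horner b l2 := by
  rw [horner, List.foldl_append, ← horner, horner_shift]

theorem evalRange_eq (ints : List Int) (b : Int) :
    ∀ k start fin, fin - start = k →
    evalRange ints b start fin =
      horner b ((List.range' start (fin - start)).map (fun i => ints.getD i 0)) := by
  intro k
  induction k using Nat.strong_induction_on with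
  | _ k ih =>
    intro start fin hk
    rw [evalRange]
    split
    · rw [horner, List.foldl_map]
    · rename_i hgt
      have h1 : start < (start + fin) / 2 := by omega
      have h2 : (start + fin) / 2 < fin := by omega
      rw [ih ((start + fin) / 2 - start) (by omega) start ((start + fin) / 2) rfl,
          ih (fin - (start + fin) / 2) (by omega) ((start + fin) / 2) fin rfl]
      have hsplit : List.range' start (fin - start) =
          List.range' start ((start + fin) / 2 - start) ++
          List.range' ((start + fin) / 2) (fin - (start + fin) / 2) := by
        rw [show fin - start = ((start + fin) / 2 - start) + (fin - (start + fin) / 2) by omega,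
            ← List.range'_append,
            show start + 1 * ((start + fin) / 2 - start) = (start + fin) / 2 by omega]
      rw [hsplit, List.map_append, horner_append]
      simp

theorem map_getD_range' (l : List Int) :
    (List.range' 0 l.length).map (fun i => l.getD i 0) = l := by
  apply List.ext_getElem
  · simp
  · intro i h1 h2
    simp only [List.getElem_map, List.getElem_range']
    rw [show 0 + 1 * i = i by omega, List.getD_eq_getElem?_getD, List.getElem?_eq_getElem h2]
    rfl

-- ===== VERDICT (by name: the statement is the Claim_ definition above) =====
theorem fromAnyBase_spec : Claim_equal_fromAnyBase := by
  intro n b _ _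
  unfold Spec_fromAnyBase fromAnyBase fromAnyBase_alt
  simp only
  split
  · rename_i h; rw [h]; simp
  · rw [evalRange_eq _ _ _ 0 _ rfl]
    simp only [Nat.sub_zero]
    rw [map_getD_range', horner, List.foldl_map]
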